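-- pv_equiv track=rewrite | github.com/ndey96/reversi-ai | reversi.py | get_depth_from_time
-- ===== SOURCE A (Python) =====
-- AVG_TIMES = [2, 8, 250, 3700, 15000, 75000] # Milliseconds
--
-- def get_depth_from_time(secs):
--     time_limit = secs * 1000
--     depth_limit = 6 # Default value in case time_limit exceeds all AVG_TIMES
--     for idx, time in enumerate(AVG_TIMES):
--         if time > time_limit:
--             depth_limit = idx
--             break
--     return depth_limit
-- ===== SOURCE B (Python) =====
-- from bisect import bisect_right
--
-- AVG_TIMES = [2, 8, 250, 3700, 15000, 75000] # Milliseconds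
--
-- def get_depth_from_time(secs):
--     # index of first AVG_TIMES entry strictly greater than secs*1000,
--     # = len(AVG_TIMES) (the default 6) when none is greater
--     return bisect_right(AVG_TIMES, secs * 1000)
-- ===== Notes on version B (the rewrite author's own statement) =====
-- stated objective: idiomatic
-- what changed: Replaces the linear enumerate/break scan over AVG_TIMES with a binary search (bisect_right), whose result on the ascending array is exactly the index of the first entry greater than the millisecond limit, defaulting to the array length when none is.
import Mathlib
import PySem

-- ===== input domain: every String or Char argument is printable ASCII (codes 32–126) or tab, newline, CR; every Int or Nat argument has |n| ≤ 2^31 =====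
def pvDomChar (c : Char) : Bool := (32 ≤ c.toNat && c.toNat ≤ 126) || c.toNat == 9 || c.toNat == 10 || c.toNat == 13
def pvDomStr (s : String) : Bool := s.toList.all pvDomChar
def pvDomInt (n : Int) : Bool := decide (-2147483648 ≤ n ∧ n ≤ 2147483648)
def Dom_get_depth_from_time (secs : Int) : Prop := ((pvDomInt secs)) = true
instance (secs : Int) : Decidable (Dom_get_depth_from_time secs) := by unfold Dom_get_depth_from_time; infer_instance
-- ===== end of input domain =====

-- B replaces A's linear enumerate/break scan with bisect_right on the ascending constant array (idiomatic).
-- ===== PORT A =====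
def AVG_TIMES : List Int := [2, 8, 250, 3700, 15000, 75000]  -- Milliseconds

-- 'for idx, time in enumerate(AVG_TIMES): if time > time_limit: depth_limit = idx; break'
def pvAScan (time_limit : Int) : List (Int × Int) → Int → Int
  | [], depth_limit => depth_limit
  | (idx, time) :: rest, depth_limit =>
      if time > time_limit then idx else pvAScan time_limit rest depth_limit

def get_depth_from_time (secs : Int) : Int :=
  let time_limit := secs * 1000
  let depth_limit : Int := 6  -- Default value in case time_limit exceeds all AVG_TIMES
  pvAScan time_limit (PySem.List.enumerate AVG_TIMES) depth_limit

-- ===== PORT B =====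
def get_depth_from_time_alt (secs : Int) : Int :=
  PySem.List.bisectRight AVG_TIMES (secs * 1000)

-- ===== PRECONDITION & SPEC =====
def Spec_get_depth_from_time (secs : Int) (out : Int) : Prop := out = get_depth_from_time_alt secs
instance (secs : Int) (out : Int) : Decidable (Spec_get_depth_from_time secs out) := by unfold Spec_get_depth_from_time; infer_instance

-- ===== CLAIM (what is proved, stated in full; the proofs are below) =====
def Claim_equal_get_depth_from_time : Prop := ∀ (secs : Int), Dom_get_depth_from_time secs → Spec_get_depth_from_time secs (get_depth_from_time secs)

-- ===== LEMMAS AND PROOFS =====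

-- ===== VERDICT (by name: the statement is the Claim_ definition above) =====
theorem get_depth_from_time_spec : Claim_equal_get_depth_from_time := by
  intro secs _
  unfold Spec_get_depth_from_time get_depth_from_time get_depth_from_time_alt
  simp [AVG_TIMES, PySem.List.enumerate, PySem.List.bisectRight, PySem.List.bisectRightLoop, pvAScan]
  split_ifs <;> omega
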